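-- pv_equiv track=rewrite | github.com/leixiaolin/smartMusic_v2 | pitch_helper.py | get_wrong_symbols_in_all_symbols
-- ===== SOURCE A (Python) =====
-- def get_wrong_symbols_in_all_symbols(all_symbols,lcs):
--     positions = []
--     wrong_symbols = []
--     all_symbols_list = [x for x in lcs]
--     for i in range(len(all_symbols)):
--         a = all_symbols[i]
--         if i > len(all_symbols_list)-1:
--             all_symbols_list.insert(i, a)
--             positions.append(i)
--             wrong_symbols.append(a)
--         if a != all_symbols_list[i]:
--             all_symbols_list.insert(i,a)
--             positions.append(i)
--             wrong_symbols.append(a)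
--     return wrong_symbols,positions
-- ===== SOURCE B (Python) =====
-- def get_wrong_symbols_in_all_symbols(all_symbols, lcs):
--     # Two-pointer scan: advance j through lcs only on a match; no list inserts.
--     wrong_symbols = []
--     positions = []
--     j = 0
--     n = len(lcs)
--     for i, a in enumerate(all_symbols):
--         if j < n and a == lcs[j]:
--             j += 1
--         else:
--             wrong_symbols.append(a)
--             positions.append(i)
--     return wrong_symbols, positions
-- ===== Notes on version B (the rewrite author's own statement) =====
-- stated objective: faster
-- what changed: Replaces A's mutable working list with repeated list.insert (an O(n) shift per mismatch) by a two-pointer scan that advances an index into lcs only on a match, never building or mutating a list of lcs characters.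
import Mathlib
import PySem

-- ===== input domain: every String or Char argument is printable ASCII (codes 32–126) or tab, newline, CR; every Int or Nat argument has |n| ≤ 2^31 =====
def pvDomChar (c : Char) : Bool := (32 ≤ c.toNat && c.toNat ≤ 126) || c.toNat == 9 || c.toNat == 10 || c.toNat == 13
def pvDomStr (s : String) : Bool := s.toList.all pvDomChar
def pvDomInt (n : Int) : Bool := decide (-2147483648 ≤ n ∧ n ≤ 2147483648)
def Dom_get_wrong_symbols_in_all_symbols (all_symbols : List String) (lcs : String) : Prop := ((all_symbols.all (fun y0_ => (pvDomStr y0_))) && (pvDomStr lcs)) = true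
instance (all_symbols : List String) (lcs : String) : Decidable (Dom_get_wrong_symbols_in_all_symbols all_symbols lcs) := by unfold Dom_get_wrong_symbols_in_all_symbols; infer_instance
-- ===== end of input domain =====

-- B replaces A's quadratic insert-into-working-list scan by a linear two-pointer scan (same return value).

-- ===== PORT A =====
-- The Python for-loop 'for i in range(len(all_symbols)): a = all_symbols[i]' is transliterated
-- as structural recursion over all_symbols carrying the index i; the loop body is step for step.
def pvAGo (syms : List String) (i : Nat) (lst : List String) (wrong : List String) (pos : List Int) : List String × List Int :=
  match syms with
  | [] => (wrong, pos)
  | a :: rest =>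
    -- if i > len(all_symbols_list)-1: insert / record
    let s1 : List String × List String × List Int :=
      if (i : Int) > (lst.length : Int) - 1 then
        (PySem.List.insert lst (i : Int) a, wrong ++ [a], pos ++ [(i : Int)])
      else (lst, wrong, pos)
    -- if a != all_symbols_list[i]: insert / record  (index i is always in range here; none is unreachable)
    let s2 : List String × List String × List Int :=
      match PySem.List.pyGet? s1.1 (i : Int) with
      | some x => if a ≠ x then (PySem.List.insert s1.1 (i : Int) a, s1.2.1 ++ [a], s1.2.2 ++ [(i : Int)]) else s1
      | none => s1
    pvAGo rest (i + 1) s2.1 s2.2.1 s2.2.2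

def get_wrong_symbols_in_all_symbols (all_symbols : List String) (lcs : String) : List String × List Int :=
  pvAGo all_symbols 0 (lcs.toList.map (fun c => c.toString)) [] []

-- ===== PORT B =====
-- Two-pointer scan from Source B: j walks lcs, advanced only on a match; lcs[j] is read under the
-- guard j < n, so 'getD' with a dummy default is exact there.
def pvBGo (cs : List Char) (syms : List String) (i j : Nat) (wrong : List String) (pos : List Int) : List String × List Int :=
  match syms with
  | [] => (wrong, pos)
  | a :: rest =>
    if j < cs.length ∧ a = (cs.getD j ' ').toString then
      pvBGo cs rest (i + 1) (j + 1) wrong pos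
    else
      pvBGo cs rest (i + 1) j (wrong ++ [a]) (pos ++ [(i : Int)])

def get_wrong_symbols_in_all_symbols_alt (all_symbols : List String) (lcs : String) : List String × List Int :=
  pvBGo lcs.toList all_symbols 0 0 [] []

-- ===== PRECONDITION & SPEC =====
def Spec_get_wrong_symbols_in_all_symbols (all_symbols : List String) (lcs : String) (out : List String × List Int) : Prop := out = get_wrong_symbols_in_all_symbols_alt all_symbols lcs
instance (all_symbols : List String) (lcs : String) (out : List String × List Int) : Decidable (Spec_get_wrong_symbols_in_all_symbols all_symbols lcs out) := by unfold Spec_get_wrong_symbols_in_all_symbols; infer_instance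

-- ===== CLAIM (what is proved, stated in full; the proofs are below) =====
def Claim_equal_get_wrong_symbols_in_all_symbols : Prop := ∀ (all_symbols : List String) (lcs : String), Dom_get_wrong_symbols_in_all_symbols all_symbols lcs → Spec_get_wrong_symbols_in_all_symbols all_symbols lcs (get_wrong_symbols_in_all_symbols all_symbols lcs)

-- ===== LEMMAS AND PROOFS =====

-- Invariant: A's working list is (processed prefix p of length i) ++ the unmatched tail of lcs.
theorem pvGo_eq (cs : List Char) :
    ∀ (syms p : List String) (j : Nat) (wrong : List String) (pos : List Int),
      j ≤ cs.length →
      pvAGo syms p.length (p ++ (cs.drop j).map (fun c => c.toString)) wrong pos =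
        pvBGo cs syms p.length j wrong pos := by
  intro syms
  induction syms with
  | nil => intro p j wrong pos hj; rfl
  | cons a rest ih =>
    intro p j wrong pos hj
    by_cases hje : j = cs.length
    · -- tail empty: A's first branch fires, second compares a with a (equal)
      subst hje
      simp only [List.drop_length, List.map_nil, List.append_nil]
      rw [pvAGo, pvBGo]
      rw [if_pos (show (p.length : Int) > (p.length : Int) - 1 by omega)]
      rw [if_neg (show ¬ (cs.length < cs.length ∧ a = (cs.getD cs.length ' ').toString) from
        fun h => absurd h.1 (lt_irrefl _))]
      rw [PySem.List.insert_natCast p p.length a (le_refl _)]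
      simp only [List.take_length, List.drop_length]
      rw [PySem.List.pyGet?_append_length p [] a]
      simp only [ne_eq, not_true_eq_false, if_false]
      have := ih (p ++ [a]) cs.length (wrong ++ [a]) (pos ++ [(p.length : Int)]) (le_refl _)
      simpa [List.drop_length] using this
    · -- tail nonempty: lst[i] = lcs char at j
      have hjlt : j < cs.length := lt_of_le_of_ne hj hje
      have hdrop : cs.drop j = cs[j] :: cs.drop (j + 1) := List.drop_eq_getElem_cons hjlt
      rw [pvAGo, pvBGo, hdrop]
      simp only [List.map_cons]
      have hc1 : ¬ ((p.length : Int) >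
          (((p ++ (cs[j]).toString :: (cs.drop (j+1)).map (fun c => c.toString)).length : Int)) - 1) := by
        simp only [List.length_append, List.length_cons, List.length_map]
        omega
      rw [if_neg hc1]
      have hget := PySem.List.pyGet?_append_length p ((cs.drop (j+1)).map (fun c => c.toString)) (cs[j]).toString
      simp only [hget]
      by_cases hm : a = (cs[j]).toString
      · -- match: both loops advance j / the split point
        have hcB : j < cs.length ∧ a = (cs.getD j ' ').toString :=
          ⟨hjlt, by rw [List.getD_eq_getElem cs ' ' hjlt]; exact hm⟩
        rw [if_pos hcB]
        simp only [hm, ne_eq, not_true_eq_false, if_false]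
        have := ih (p ++ [(cs[j]).toString]) (j + 1) wrong pos hjlt
        simpa using this
      · -- mismatch: A inserts a at i, B records; the unmatched tail of lcs is unchanged
        have hcB : ¬ (j < cs.length ∧ a = (cs.getD j ' ').toString) := by
          intro h; exact hm (by rw [← List.getD_eq_getElem cs ' ' hjlt]; exact h.2)
        rw [if_neg hcB]
        simp only [ne_eq, hm, not_false_eq_true, if_true]
        rw [PySem.List.insert_natCast _ p.length a (by simp)]
        rw [List.take_left' rfl, List.drop_left' rfl]
        have := ih (p ++ [a]) j (wrong ++ [a]) (pos ++ [(p.length : Int)]) hj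
        rw [hdrop] at this
        simp only [List.map_cons] at this
        simpa using this

-- ===== VERDICT (by name: the statement is the Claim_ definition above) =====
theorem get_wrong_symbols_in_all_symbols_spec : Claim_equal_get_wrong_symbols_in_all_symbols := by
  intro all_symbols lcs _
  unfold Spec_get_wrong_symbols_in_all_symbols get_wrong_symbols_in_all_symbols get_wrong_symbols_in_all_symbols_alt
  have := pvGo_eq lcs.toList all_symbols [] 0 [] [] (Nat.zero_le _)
  simpa using this
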